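-- pv_equiv track=rewrite | github.com/tocci21/fantasy | helpers.py | translate_team
-- ===== SOURCE A (Python) =====
-- def translate_team(input: str, output: str, team_name: str) -> str:
--
--     teams = [
--         {'espn': 'WSH', 'sleeper': 'WAS', 'fp': 'WAS'},
--         {'espn': 'JAX', 'sleeper': 'JAX', 'fp': 'JAC'},
--         {'espn': 'OAK', 'sleeper': 'LV', 'fp': 'LV'},
--     ]
--
--     for team in teams:
--         if team.get(input) == team_name:
--             return team.get(output)
--
--     return team_name
-- ===== SOURCE B (Python) =====
-- # Transposed, column-oriented table: one abbreviation column per naming system.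
-- # Translation = positional join: row index in the input column, read output column at it.
-- _SYSTEMS = {
--     'espn':    ['WSH', 'JAX', 'OAK'],
--     'sleeper': ['WAS', 'JAX', 'LV'],
--     'fp':      ['WAS', 'JAC', 'LV'],
-- }
--
--
-- def translate_team(input: str, output: str, team_name: str) -> str:
--     src = _SYSTEMS.get(input)
--     if src is None or team_name not in src:
--         return team_name
--     dst = _SYSTEMS.get(output)
--     if dst is None:
--         return None
--     return dst[src.index(team_name)]
-- ===== Notes on version B (the rewrite author's own statement) =====
-- stated objective: alternative
-- what changed: Replaces A's row-oriented scan over team dicts with a transposed column-oriented table (one abbreviation list per naming system) and a positional join: locate the row index of team_name in the input system's column, then read the output system's column at that index.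
import Mathlib
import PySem

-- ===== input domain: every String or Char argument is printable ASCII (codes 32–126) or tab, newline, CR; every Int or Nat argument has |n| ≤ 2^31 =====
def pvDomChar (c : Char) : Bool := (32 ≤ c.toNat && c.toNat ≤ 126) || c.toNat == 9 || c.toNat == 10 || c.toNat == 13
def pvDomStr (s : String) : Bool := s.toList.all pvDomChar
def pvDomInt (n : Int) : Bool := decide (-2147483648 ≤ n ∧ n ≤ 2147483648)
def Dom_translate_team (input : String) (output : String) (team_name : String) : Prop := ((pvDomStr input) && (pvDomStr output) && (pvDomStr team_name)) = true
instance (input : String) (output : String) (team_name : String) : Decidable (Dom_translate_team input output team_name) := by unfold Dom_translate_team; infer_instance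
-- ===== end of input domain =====

-- B swaps A's row-oriented scan over team dicts for a transposed column table with a positional join (alternative decomposition; same observable behaviour).


-- ===== PORT A =====
def pvTeamsA : List (PySem.Dict String String) :=
  [ PySem.Dict.mk [("espn", "WSH"), ("sleeper", "WAS"), ("fp", "WAS")],
    PySem.Dict.mk [("espn", "JAX"), ("sleeper", "JAX"), ("fp", "JAC")],
    PySem.Dict.mk [("espn", "OAK"), ("sleeper", "LV"), ("fp", "LV")] ]

-- the 'for team in teams' loop: first team with team.get(input) == team_name, else fall through
def pvLoopA (input : String) (output : String) (team_name : String) : List (PySem.Dict String String) → Option String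
  | [] => some team_name
  | t :: rest =>
      if t.get? input = some team_name then t.get? output
      else pvLoopA input output team_name rest

def translate_team (input : String) (output : String) (team_name : String) : Option String :=
  pvLoopA input output team_name pvTeamsA

-- ===== PORT B =====
-- _SYSTEMS: transposed table, one abbreviation column per naming system
def pvSystemsB : PySem.Dict String (List String) :=
  PySem.Dict.mk
    [ ("espn",    ["WSH", "JAX", "OAK"]),
      ("sleeper", ["WAS", "JAX", "LV"]),
      ("fp",      ["WAS", "JAC", "LV"]) ]

def translate_team_alt (input : String) (output : String) (team_name : String) : Option String :=
  match pvSystemsB.get? input with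
  | none => some team_name
  | some src =>
      match PySem.List.index? src team_name with          -- 'team_name not in src' / src.index(team_name)
      | none => some team_name
      | some i =>
          match pvSystemsB.get? output with
          | none => none
          | some dst => PySem.List.pyGet? dst (Int.ofNat i)   -- dst[i]; always in range here (equal column lengths)

-- ===== PRECONDITION & SPEC =====
def Spec_translate_team (input : String) (output : String) (team_name : String) (out : Option String) : Prop := out = translate_team_alt input output team_name
instance (input : String) (output : String) (team_name : String) (out : Option String) : Decidable (Spec_translate_team input output team_name out) := by unfold Spec_translate_team; infer_instance

-- ===== CLAIM (what is proved, stated in full; the proofs are below) =====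
def Claim_equal_translate_team : Prop := ∀ (input : String) (output : String) (team_name : String), Dom_translate_team input output team_name → Spec_translate_team input output team_name (translate_team input output team_name)

-- ===== LEMMAS AND PROOFS =====
-- one matched row: A reads the row dict at `output`; B reads the output column at the row's index i
theorem pvCol (output x y z : String) (la lb lc : List String) (i : Int)
    (hx : PySem.List.pyGet? la i = some x) (hy : PySem.List.pyGet? lb i = some y)
    (hz : PySem.List.pyGet? lc i = some z) :
    (PySem.Dict.mk [("espn", x), ("sleeper", y), ("fp", z)]).get? output =
      (match (PySem.Dict.mk [("espn", la), ("sleeper", lb), ("fp", lc)]).get? output with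
       | none => none
       | some dst => PySem.List.pyGet? dst i) := by
  cases h1 : ("espn" == output) <;> cases h2 : ("sleeper" == output) <;> cases h3 : ("fp" == output) <;>
    simp [PySem.Dict.get?, List.find?, h1, h2, h3, hx, hy, hz]

theorem translate_team_eq_alt (input output team_name : String) :
    translate_team input output team_name = translate_team_alt input output team_name := by
  by_cases h1 : input = "espn"
  · subst h1
    by_cases t1 : team_name = "WSH"
    · subst t1; exact pvCol output "WSH" "WAS" "WAS" _ _ _ 0 rfl rfl rfl
    · by_cases t2 : team_name = "JAX"
      · subst t2; exact pvCol output "JAX" "JAX" "JAC" _ _ _ 1 rfl rfl rfl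
      · by_cases t3 : team_name = "OAK"
        · subst t3; exact pvCol output "OAK" "LV" "LV" _ _ _ 2 rfl rfl rfl
        · have t1' : ¬ "WSH" = team_name := fun h => t1 h.symm
          have t2' : ¬ "JAX" = team_name := fun h => t2 h.symm
          have t3' : ¬ "OAK" = team_name := fun h => t3 h.symm
          simp [translate_team, translate_team_alt, pvTeamsA, pvSystemsB, pvLoopA,
            PySem.Dict.get?, List.find?, PySem.List.index?, List.idxOf?, List.findIdx?,
            List.findIdx?.go, t1', t2', t3']
  · by_cases h2 : input = "sleeper"
    · subst h2
      by_cases t1 : team_name = "WAS"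
      · subst t1; exact pvCol output "WSH" "WAS" "WAS" _ _ _ 0 rfl rfl rfl
      · by_cases t2 : team_name = "JAX"
        · subst t2; exact pvCol output "JAX" "JAX" "JAC" _ _ _ 1 rfl rfl rfl
        · by_cases t3 : team_name = "LV"
          · subst t3; exact pvCol output "OAK" "LV" "LV" _ _ _ 2 rfl rfl rfl
          · have t1' : ¬ "WAS" = team_name := fun h => t1 h.symm
            have t2' : ¬ "JAX" = team_name := fun h => t2 h.symm
            have t3' : ¬ "LV" = team_name := fun h => t3 h.symm
            simp [translate_team, translate_team_alt, pvTeamsA, pvSystemsB, pvLoopA,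
              PySem.Dict.get?, List.find?, PySem.List.index?, List.idxOf?, List.findIdx?,
              List.findIdx?.go, t1', t2', t3']
    · by_cases h3 : input = "fp"
      · subst h3
        by_cases t1 : team_name = "WAS"
        · subst t1; exact pvCol output "WSH" "WAS" "WAS" _ _ _ 0 rfl rfl rfl
        · by_cases t2 : team_name = "JAC"
          · subst t2; exact pvCol output "JAX" "JAX" "JAC" _ _ _ 1 rfl rfl rfl
          · by_cases t3 : team_name = "LV"
            · subst t3; exact pvCol output "OAK" "LV" "LV" _ _ _ 2 rfl rfl rfl
            · have t1' : ¬ "WAS" = team_name := fun h => t1 h.symm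
              have t2' : ¬ "JAC" = team_name := fun h => t2 h.symm
              have t3' : ¬ "LV" = team_name := fun h => t3 h.symm
              simp [translate_team, translate_team_alt, pvTeamsA, pvSystemsB, pvLoopA,
                PySem.Dict.get?, List.find?, PySem.List.index?, List.idxOf?, List.findIdx?,
                List.findIdx?.go, t1', t2', t3']
      · have b1 : ("espn" == input) = false := by simp; exact fun h => h1 h.symm
        have b2 : ("sleeper" == input) = false := by simp; exact fun h => h2 h.symm
        have b3 : ("fp" == input) = false := by simp; exact fun h => h3 h.symm
        simp [translate_team, translate_team_alt, pvTeamsA, pvSystemsB, pvLoopA,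
          PySem.Dict.get?, List.find?, b1, b2, b3]

-- ===== VERDICT (by name: the statement is the Claim_ definition above) =====
theorem translate_team_spec : Claim_equal_translate_team := by
  intro input output team_name _
  exact translate_team_eq_alt input output team_name
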